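-- pv_equiv track=rewrite | github.com/daniel-reich/turbo-robot | pnd7xPYuvogkNfHg6_15.py | get_best_student
-- ===== SOURCE A (Python) =====
-- def get_best_student(dic):
--     lis = []
--     for i in dic.values():
--         l = []
--         for j in i:
--             l.append(j)
--         avg = sum(l)//len(l)
--         lis.append(avg)
--
--     maxavg = max(lis)
--     ind = lis.index(maxavg)
--
--     l = 0
--     for i in dic.keys():
--         if(l == ind):
--             return i
--             break
--         else:
--             l+=1
-- ===== SOURCE B (Python) =====
-- def get_best_student(dic):
--     return max(dic, key=lambda k: sum(dic[k]) // len(dic[k]))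
-- ===== Notes on version B (the rewrite author's own statement) =====
-- stated objective: idiomatic
-- what changed: Replaced A's four passes (copy each grade list, build a parallel averages list, take max, find its index, then walk the keys with a counter) by a single keyed max over the dict, max(dic, key=...), relying on max returning the first maximal element to preserve A's tie-breaking.
import Mathlib
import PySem

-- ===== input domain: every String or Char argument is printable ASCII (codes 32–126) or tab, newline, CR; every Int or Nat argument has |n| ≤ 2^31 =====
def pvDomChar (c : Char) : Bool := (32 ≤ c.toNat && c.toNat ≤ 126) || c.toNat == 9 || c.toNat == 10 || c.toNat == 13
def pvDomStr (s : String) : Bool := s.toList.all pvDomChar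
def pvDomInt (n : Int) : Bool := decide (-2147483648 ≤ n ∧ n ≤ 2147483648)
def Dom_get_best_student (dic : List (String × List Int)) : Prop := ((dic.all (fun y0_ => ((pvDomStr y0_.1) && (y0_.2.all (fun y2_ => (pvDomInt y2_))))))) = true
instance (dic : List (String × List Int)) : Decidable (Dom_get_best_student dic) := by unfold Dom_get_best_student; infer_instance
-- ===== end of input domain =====

-- B replaces A's four passes (copy grades, averages list, max, index, key walk) with one
-- keyed maximum over the dict (idiomatic max-with-key); same value on every admitted input.


-- ===== PORT A =====
-- the final 'for i in dic.keys(): if l == ind: return i else: l += 1' loop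
def pvWalkA : List String → Int → Int → String
  | [], _, _ => ""          -- loop exhausted: Python falls off and returns None (unreachable under Pre_)
  | i :: rest, l, ind => if l == ind then i else pvWalkA rest (l + 1) ind

def get_best_student (dic : List (String × List Int)) : String :=
  let lis : List Int := dic.foldl (fun lis i =>
      let l : List Int := i.2.foldl (fun l j => l ++ [j]) []
      let avg := PySem.Int.floordiv l.sum (l.length : Int)   -- len(l) = 0 → ZeroDivisionError, excluded by Pre_
      lis ++ [avg]) []
  match PySem.List.max? lis (fun x => x) with
  | none => ""              -- max([]) → ValueError, excluded by Pre_
  | some maxavg =>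
    match PySem.List.index? lis maxavg with
    | none => ""            -- unreachable: maxavg ∈ lis
    | some ind => pvWalkA ((PySem.Dict.mk dic).keys) 0 (ind : Int)

-- ===== PORT B =====
-- the key function 'lambda k: sum(dic[k]) // len(dic[k])'
def pvAvgKey (dic : List (String × List Int)) (k : String) : Int :=
  let g := ((PySem.Dict.mk dic).get? k).getD []   -- KeyError impossible: k is drawn from dic's keys
  PySem.Int.floordiv g.sum (g.length : Int)  -- len = 0 → ZeroDivisionError, excluded by Pre_

def get_best_student_alt (dic : List (String × List Int)) : String :=
  match PySem.List.max? ((PySem.Dict.mk dic).keys) (pvAvgKey dic) with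
  | none => ""              -- max of empty dict → ValueError, excluded by Pre_
  | some k => k

-- ===== PRECONDITION & SPEC =====
-- Excluded: the empty dict (A raises ValueError at max), a student with an empty grade list
-- (A raises ZeroDivisionError), and duplicate keys, which a Python dict cannot contain.
def Pre_get_best_student (dic : List (String × List Int)) : Prop :=
  dic ≠ [] ∧ (∀ p ∈ dic, p.2 ≠ []) ∧ (dic.map Prod.fst).Nodup
instance (dic : List (String × List Int)) : Decidable (Pre_get_best_student dic) := by
  unfold Pre_get_best_student; infer_instance
def pvWitness_get_best_student : (List (String × List Int)) := [("amy", [90, 80]), ("bob", [100])]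

def Spec_get_best_student (dic : List (String × List Int)) (out : String) : Prop := out = get_best_student_alt dic
instance (dic : List (String × List Int)) (out : String) : Decidable (Spec_get_best_student dic out) := by unfold Spec_get_best_student; infer_instance

-- ===== CLAIM (what is proved, stated in full; the proofs are below) =====
def Claim_equal_get_best_student : Prop := ∀ (dic : List (String × List Int)), Dom_get_best_student dic → Pre_get_best_student dic → Spec_get_best_student dic (get_best_student dic)

-- ===== LEMMAS AND PROOFS =====

-- the average of a pair's grade list, shared spec value of both ports
def pvAvg (p : String × List Int) : Int := PySem.Int.floordiv p.2.sum (p.2.length : Int)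

-- max? over a mapped list, with the key pulled back through the map
theorem pv_max?_map {α β : Type} (h : α → β) (f : β → Int) (xs : List α) :
    PySem.List.max? (xs.map h) f = Option.map h (PySem.List.max? xs (fun x => f (h x))) := by
  unfold PySem.List.max?
  have H : ∀ (l : List α) (acc : Option α),
      List.foldl (fun acc x => match acc with | none => some x | some m => if f m < f x then some x else some m)
        (Option.map h acc) (l.map h)
      = Option.map h (List.foldl (fun acc x => match acc with | none => some x | some m => if f (h m) < f (h x) then some x else some m) acc l) := by
    intro l
    induction l with
    | nil => intro acc; rfl
    | cons x t ih =>
      intro acc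
      cases acc with
      | none => simpa using ih (some x)
      | some m =>
        by_cases hc : f (h m) < f (h x)
        · simpa [hc] using ih (some x)
        · simpa [hc] using ih (some m)
  simpa using H xs none

-- max? only looks at key values of list members (and of the seed)
theorem pv_max?_congr {α : Type} (k1 k2 : α → Int) (xs : List α)
    (h : ∀ x ∈ xs, k1 x = k2 x) :
    PySem.List.max? xs k1 = PySem.List.max? xs k2 := by
  unfold PySem.List.max?
  have H : ∀ (l : List α), (∀ y ∈ l, k1 y = k2 y) → ∀ (acc : Option α), (∀ m, acc = some m → k1 m = k2 m) →
      List.foldl (fun acc x => match acc with | none => some x | some m => if k1 m < k1 x then some x else some m) acc l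
      = List.foldl (fun acc x => match acc with | none => some x | some m => if k2 m < k2 x then some x else some m) acc l := by
    intro l
    induction l with
    | nil => intro _ acc _; rfl
    | cons x t ih =>
      intro hl acc hacc
      have hx : k1 x = k2 x := hl x (by simp)
      have ht : ∀ y ∈ t, k1 y = k2 y := fun y hy => hl y (by simp [hy])
      cases acc with
      | none =>
        simpa using ih ht (some x) (by intro m hm; cases hm; exact hx)
      | some m =>
        have hm : k1 m = k2 m := hacc m rfl
        by_cases hc : k2 m < k2 x
        · have hc1 : k1 m < k1 x := by rw [hm, hx]; exact hc
          simpa [hc, hc1] using ih ht (some x) (by intro m' hm'; cases hm'; exact hx)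
        · have hc1 : ¬ k1 m < k1 x := by rw [hm, hx]; exact hc
          simpa [hc, hc1] using ih ht (some m) (by intro m' hm'; cases hm'; exact hm)
  exact H xs h none (by intro m hm; cases hm)

-- first-match lookup in an association list with distinct keys
theorem pv_find?_of_nodup (dic : List (String × List Int)) (p : String × List Int)
    (hnd : (dic.map Prod.fst).Nodup) (hp : p ∈ dic) :
    dic.find? (fun q => q.1 == p.1) = some p := by
  induction dic with
  | nil => cases hp
  | cons q t ih =>
    rcases List.mem_cons.mp hp with hq | hpt
    · subst hq; simp [List.find?]
    · have hnd' := hnd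
      simp only [List.map_cons, List.nodup_cons] at hnd'
      have hne : (q.1 == p.1) = false := by
        apply beq_false_of_ne
        intro he
        exact hnd'.1 (he ▸ List.mem_map.mpr ⟨p, hpt, rfl⟩)
      simp [List.find?, hne]
      exact ih hnd'.2 hpt

theorem pv_idxOf?_append_left (v : Int) (l r : List Int) (h : v ∈ l) :
    List.idxOf? v (l ++ r) = List.idxOf? v l := by
  induction l with
  | nil => cases h
  | cons x t ih =>
    by_cases hx : x = v
    · simp [List.idxOf?_cons, hx]
    · have hv : v ∈ t := by
        cases List.mem_cons.mp h with
        | inl h1 => exact absurd h1.symm hx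
        | inr h1 => exact h1
      simp [List.idxOf?_cons, hx, ih hv]

theorem pv_idxOf?_append_self (v : Int) (l : List Int) (h : v ∉ l) :
    List.idxOf? v (l ++ [v]) = some l.length := by
  induction l with
  | nil => simp [List.idxOf?_cons]
  | cons x t ih =>
    have hx : ¬ x = v := by intro he; exact h (he ▸ List.mem_cons_self)
    have ht : v ∉ t := fun hv => h (List.mem_cons.mpr (Or.inr hv))
    simp [List.idxOf?_cons, hx, ih ht]

-- the heart: max?, max of the mapped averages, and first index agree on the same position
theorem pv_main {α : Type} (g : α → Int) (xs : List α) (hne : xs ≠ []) :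
    ∃ i, ∃ hi : i < xs.length,
      PySem.List.max? xs g = some xs[i] ∧
      PySem.List.max? (xs.map g) (fun x => x) = some (g xs[i]) ∧
      List.idxOf? (g xs[i]) (xs.map g) = some i := by
  have happ : ∀ {β : Type} (k : β → Int) (l : List β) (y : β), PySem.List.max? (l ++ [y]) k =
      match PySem.List.max? l k with | none => some y | some m => if k m < k y then some y else some m := by
    intro β k l y
    simp only [PySem.List.max?, List.foldl_append, List.foldl_cons, List.foldl_nil]
    cases List.foldl (fun acc x => match acc with | none => some x | some m => if k m < k x then some x else some m) none l <;> rfl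
  induction xs using List.reverseRecOn with
  | nil => cases hne rfl
  | append_singleton xs x ih =>
    by_cases hx0 : xs = []
    · subst hx0
      exact ⟨0, by simp, by simp [PySem.List.max?], by simp [PySem.List.max?], by simp [List.idxOf?_cons]⟩
    · obtain ⟨i, hi, h1, h2, h3⟩ := ih hx0
      have hmapsplit : (xs ++ [x]).map g = xs.map g ++ [g x] := by simp
      by_cases hc : g xs[i] < g x
      · refine ⟨xs.length, by simp, ?_, ?_, ?_⟩
        · rw [happ, h1]
          simp [hc]
        · rw [hmapsplit, happ, h2]
          simp [hc]
        · have hnot : g x ∉ xs.map g := by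
            intro hmem
            rcases List.mem_map.mp hmem with ⟨y, hy, hgy⟩
            have hle := PySem.List.max?_isMax h1 y hy
            rw [hgy] at hle
            exact absurd (lt_of_lt_of_le hc hle) (lt_irrefl _)
          have := pv_idxOf?_append_self (g x) (xs.map g) hnot
          rw [hmapsplit]
          simpa [List.getElem_concat_length] using this
      · have hi' : i < (xs ++ [x]).length := by simp; omega
        have hgetl : (xs ++ [x])[i] = xs[i] := List.getElem_append_left hi
        refine ⟨i, hi', ?_, ?_, ?_⟩
        · rw [happ, h1]; simp [hc, hgetl]
        · rw [hmapsplit, happ, h2]; simp [hc, hgetl]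
        · have hmem : g xs[i] ∈ xs.map g := List.mem_map.mpr ⟨xs[i], List.getElem_mem hi, rfl⟩
          rw [hmapsplit, hgetl, pv_idxOf?_append_left _ _ _ hmem]
          exact h3

theorem pv_walkA (ks : List String) (i : Nat) (hi : i < ks.length) :
    ∀ l : Int, pvWalkA ks l (l + i) = ks[i] := by
  induction ks generalizing i with
  | nil => simp at hi
  | cons k t ih =>
    intro l
    cases i with
    | zero => simp [pvWalkA]
    | succ n =>
      have hcond : ¬ (l = l + (↑(n + 1) : Int)) := by omega
      simp only [pvWalkA, beq_iff_eq, if_neg hcond]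
      have hstep : l + (↑(n + 1) : Int) = (l + 1) + (↑n : Int) := by push_cast; ring
      rw [hstep]
      simpa using ih n (Nat.lt_of_succ_lt_succ (by simpa using hi)) (l + 1)

-- ===== VERDICT (by name: the statement is the Claim_ definition above) =====
theorem get_best_student_spec : Claim_equal_get_best_student := by
  unfold Claim_equal_get_best_student
  intro dic _ hpre
  obtain ⟨hne, hval, hnd⟩ := hpre
  unfold Spec_get_best_student get_best_student get_best_student_alt
  have hlis : dic.foldl (fun lis i =>
      lis ++ [PySem.Int.floordiv (i.2.foldl (fun l j => l ++ [j]) []).sum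
        (((i.2.foldl (fun l j => l ++ [j]) []).length : Int))]) ([] : List Int) = dic.map pvAvg := by
    have hinner : ∀ i : String × List Int, i.2.foldl (fun l j => l ++ [j]) ([] : List Int) = i.2 := by
      intro i; simpa using PySem.List.foldl_append_singleton_eq_self (l := i.2) (acc := [])
    calc dic.foldl (fun lis i =>
        lis ++ [PySem.Int.floordiv (i.2.foldl (fun l j => l ++ [j]) []).sum
          (((i.2.foldl (fun l j => l ++ [j]) []).length : Int))]) ([] : List Int)
        = dic.foldl (fun lis i => lis ++ [pvAvg i]) [] := by
          apply PySem.List.foldl_congr_mem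
          intro acc x _
          rw [hinner x]
          rfl
      _ = dic.map pvAvg := by
          simpa using PySem.List.foldl_append_singleton_eq_map (f := pvAvg) (l := dic) (acc := [])
  have hkeys : (PySem.Dict.mk dic).keys = dic.map Prod.fst := rfl
  have hB : PySem.List.max? (dic.map Prod.fst) (pvAvgKey dic) = Option.map Prod.fst (PySem.List.max? dic pvAvg) := by
    rw [pv_max?_map]
    congr 1
    apply pv_max?_congr
    intro p hp
    have hfind := pv_find?_of_nodup dic p hnd hp
    simp [pvAvgKey, PySem.Dict.get?, hfind, pvAvg]
  obtain ⟨i, hi, h1, h2, h3⟩ := pv_main pvAvg dic hne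
  simp only [hlis, hkeys, hB, h1, h2, Option.map_some]
  have hidx : PySem.List.index? (dic.map pvAvg) (pvAvg dic[i]) = some i := h3
  simp only [hidx]
  have hlen : i < (dic.map Prod.fst).length := by simpa using hi
  have hwalk := pv_walkA (dic.map Prod.fst) i hlen 0
  simpa using hwalk
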